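-- pv_equiv track=rewrite | github.com/pypi-data/pypi-mirror-96 | packages/topplot/topplot-0.1.8.tar.gz/topplot-0.1.8/topplot/grapher.py | generate_markeveries
-- ===== SOURCE A (Python) =====
-- from typing import Any, Dict, List, Tuple
--
-- def generate_markeveries(
--     row_count: int, col_count: int, total_markers: int
-- ) -> List[Tuple[int, int]]:
--     """Generate a list of (offset, markevery) tuples for a dataset of the given dimensions.
--
--     Makes an attempt to avoid clustering markers on different lines.
--
--     Args:
--         row_count (int): How many rows in the dataset.
--         col_count (int): How many columns in the dataset.
--         total_markers (int): How many markers are required for each line.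
--
--     Returns:
--         list: The generated (offset, markevery) tuples.
--     """
--     markeveries = []
--
--     # Calculate offsets for markers so that they don't cluster
--     clustering = True
--
--     markevery = int(row_count / total_markers)
--
--     # Loop if offsets are (still) clustered and another attempt makes sense
--     while clustering and total_markers >= 1:
--         offset_prev = None
--         for col in range(col_count):
--             offset = int(markevery / col_count) * col
--             if offset_prev is not None and offset_prev != offset:
--                 clustering = False
--             offset_prev = offset
--             markeveries.append((offset, markevery))
--         total_markers -= 1
--
--     return markeveries
-- ===== SOURCE B (Python) =====
-- def generate_markeveries(row_count, col_count, total_markers):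
--     if total_markers < 1:
--         return []
--     markevery = int(row_count / total_markers)
--     block = []
--     clustered = True
--     prev = None
--     for col in range(col_count):
--         offset = int(markevery / col_count) * col
--         if prev is not None and offset != prev:
--             clustered = False
--         prev = offset
--         block.append((offset, markevery))
--     return block * (total_markers if clustered else 1)
-- ===== Notes on version B (the rewrite author's own statement) =====
-- stated objective: simpler
-- what changed: Replaces A's retrying while-loop with a single pass that builds one block of (offset, markevery) tuples while tracking a clustering flag, then returns the block replicated by list multiplication (total_markers times if still clustered, else once); Pre_ excludes only total_markers == 0, where A raises ZeroDivisionError.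
import Mathlib
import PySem

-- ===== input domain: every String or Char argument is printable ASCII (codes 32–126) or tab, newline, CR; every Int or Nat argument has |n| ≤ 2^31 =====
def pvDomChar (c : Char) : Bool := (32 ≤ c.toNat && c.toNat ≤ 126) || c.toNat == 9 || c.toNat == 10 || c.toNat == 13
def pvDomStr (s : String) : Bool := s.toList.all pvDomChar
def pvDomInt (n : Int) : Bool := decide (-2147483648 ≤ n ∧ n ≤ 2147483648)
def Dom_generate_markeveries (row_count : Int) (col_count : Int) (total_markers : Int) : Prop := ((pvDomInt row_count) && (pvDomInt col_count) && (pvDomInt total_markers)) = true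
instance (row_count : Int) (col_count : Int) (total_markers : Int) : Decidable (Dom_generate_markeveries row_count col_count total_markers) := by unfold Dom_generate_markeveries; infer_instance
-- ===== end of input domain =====

-- B builds the marker block in one pass and replicates it, replacing A's retrying while-loop (simpler).

-- ===== PORT A =====
-- one pass of the inner 'for col in range(col_count)' loop body; state = (offset_prev, clustering, markeveries)
def pvInnerStep (markevery col_count : Int) (st : Option Int × Bool × List (Int × Int)) (col : Int) :
    Option Int × Bool × List (Int × Int) :=
  -- int(markevery / col_count): float true division then truncation = truncdiv (exact for |args| ≤ 2^31)
  let offset := (PySem.Int.truncdiv markevery col_count) * col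
  let clustering := match st.1 with
    | some p => if p ≠ offset then false else st.2.1
    | none => st.2.1
  (some offset, clustering, st.2.2 ++ [(offset, markevery)])

-- the 'while clustering and total_markers >= 1' loop
def pvOuter (col_count markevery : Int) (clustering : Bool) (total_markers : Int)
    (acc : List (Int × Int)) : List (Int × Int) :=
  if h : clustering = true ∧ 1 ≤ total_markers then
    let st := (PySem.List.pyRange 0 col_count 1).foldl (pvInnerStep markevery col_count)
      (none, clustering, acc)
    pvOuter col_count markevery st.2.1 (total_markers - 1) st.2.2
  else acc
termination_by total_markers.toNat
decreasing_by omega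

def generate_markeveries (row_count : Int) (col_count : Int) (total_markers : Int) : List (Int × Int) :=
  -- markevery = int(row_count / total_markers); Pre_ excludes total_markers = 0 (ZeroDivisionError)
  pvOuter col_count (PySem.Int.truncdiv row_count total_markers) true total_markers []

-- ===== PORT B =====
-- body of B's single 'for col in range(col_count)' loop; state = (prev, clustered, block)
def pvBlockStep (markevery col_count : Int) :
    Option Int × Bool × List (Int × Int) → Int → Option Int × Bool × List (Int × Int)
  | (prev, clustered, block), col =>
    let offset := (PySem.Int.truncdiv markevery col_count) * col
    (some offset,
     (match prev with
      | some p => clustered && !(offset ≠ p)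
      | none => clustered),
     block ++ [(offset, markevery)])

def generate_markeveries_alt (row_count : Int) (col_count : Int) (total_markers : Int) : List (Int × Int) :=
  if total_markers < 1 then []
  else
    let markevery := PySem.Int.truncdiv row_count total_markers
    let st := (PySem.List.pyRange 0 col_count 1).foldl (pvBlockStep markevery col_count)
      (none, true, [])
    -- block * (total_markers if clustered else 1)
    (List.replicate (if st.2.1 then total_markers else 1).toNat st.2.2).flatten

-- ===== PRECONDITION & SPEC =====
-- Pre_ excludes only total_markers = 0, on which Python A raises ZeroDivisionError.
def Pre_generate_markeveries (row_count : Int) (col_count : Int) (total_markers : Int) : Prop :=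
  total_markers ≠ 0
instance (row_count : Int) (col_count : Int) (total_markers : Int) :
    Decidable (Pre_generate_markeveries row_count col_count total_markers) := by
  unfold Pre_generate_markeveries; infer_instance
def pvWitness_generate_markeveries : Int × Int × Int := (10, 3, 2)

def Spec_generate_markeveries (row_count : Int) (col_count : Int) (total_markers : Int) (out : List (Int × Int)) : Prop := out = generate_markeveries_alt row_count col_count total_markers
instance (row_count : Int) (col_count : Int) (total_markers : Int) (out : List (Int × Int)) : Decidable (Spec_generate_markeveries row_count col_count total_markers out) := by unfold Spec_generate_markeveries; infer_instance

-- ===== CLAIM (what is proved, stated in full; the proofs are below) =====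
def Claim_equal_generate_markeveries : Prop := ∀ (row_count : Int) (col_count : Int) (total_markers : Int), Dom_generate_markeveries row_count col_count total_markers → Pre_generate_markeveries row_count col_count total_markers → Spec_generate_markeveries row_count col_count total_markers (generate_markeveries row_count col_count total_markers)

-- ===== LEMMAS AND PROOFS =====

-- B's loop body updates the state exactly as A's inner loop body does
theorem pvBlockStep_eq (m c : Int) : pvBlockStep m c = pvInnerStep m c := by
  funext st col
  obtain ⟨prev, clustered, block⟩ := st
  cases prev with
  | none => rfl
  | some p =>
      simp only [pvBlockStep, pvInnerStep]
      by_cases h : (PySem.Int.truncdiv m c) * col = p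
      · simp [h]
      · simp [h, Ne.symm h]

-- characterisation of one pass over range(n+1) started with clustering = true
theorem pvInner_char (m c : Int) (n : Nat) :
    ∀ acc : List (Int × Int),
      (PySem.List.pyRange 0 ((n : Int) + 1) 1).foldl (pvInnerStep m c) (none, true, acc) =
        (some ((PySem.Int.truncdiv m c) * n), decide (PySem.Int.truncdiv m c = 0 ∨ n = 0),
         acc ++ (PySem.List.pyRange 0 ((n : Int) + 1) 1).map
           (fun col => ((PySem.Int.truncdiv m c) * col, m))) := by
  induction n with
  | zero =>
      intro acc
      rw [show ((0 : Nat) : Int) + 1 = 0 + 1 by ring, PySem.List.pyRange_one_singleton]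
      simp [pvInnerStep]
  | succ k ih =>
      intro acc
      have h : PySem.List.pyRange 0 ((↑(k + 1) : Int) + 1) 1 =
          PySem.List.pyRange 0 ((k : Int) + 1) 1 ++ [((k : Int) + 1)] := by
        have := PySem.List.pyRange_one_succ_right (a := 0) (b := (k : Int) + 1) (by omega)
        push_cast
        push_cast at this
        exact this
      rw [h, List.foldl_append, ih acc]
      simp only [List.foldl_cons, List.foldl_nil, pvInnerStep, List.map_append]
      by_cases hd : PySem.Int.truncdiv m c = 0
      · simp [hd]
      · have hne : (PySem.Int.truncdiv m c) * (k : Int) ≠ (PySem.Int.truncdiv m c) * ((k : Int) + 1) := by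
          intro he
          apply hd
          nlinarith [he]
        simp [hne, hd]

-- with col_count ≤ 0 the inner loop does nothing and A's outer loop spins to exhaustion
theorem pvOuter_empty (c m : Int) (hc : c ≤ 0) :
    ∀ (k : Nat) (t : Int), t.toNat = k → ∀ acc, pvOuter c m true t acc = acc := by
  intro k
  induction k with
  | zero =>
      intro t ht acc
      rw [pvOuter]
      have : ¬ (1 ≤ t) := by omega
      simp [this]
  | succ j ih =>
      intro t ht acc
      rw [pvOuter]
      by_cases h1 : 1 ≤ t
      · simp only [h1, and_true]
        rw [PySem.List.pyRange_one_eq_nil (by omega)]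
        simp only [List.foldl_nil]
        exact ih (t - 1) (by omega) acc
      · simp [h1]

-- clustering case: the same block is appended total_markers times
theorem pvOuter_rep (c m : Int) (n : Nat) (hc : c = (n : Int) + 1)
    (hflag : PySem.Int.truncdiv m c = 0 ∨ n = 0) :
    ∀ (k : Nat) (t : Int), t.toNat = k → 0 ≤ t → ∀ acc,
      pvOuter c m true t acc =
        acc ++ (List.replicate t.toNat
          ((PySem.List.pyRange 0 c 1).map (fun col => ((PySem.Int.truncdiv m c) * col, m)))).flatten := by
  subst hc
  intro k
  induction k with
  | zero =>
      intro t ht h0 acc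
      have ht0 : t = 0 := by omega
      subst ht0
      rw [pvOuter]
      simp
  | succ j ih =>
      intro t ht h0 acc
      have h1 : 1 ≤ t := by omega
      rw [pvOuter, dif_pos (show (true = true ∧ 1 ≤ t) from ⟨rfl, h1⟩)]
      rw [pvInner_char m ((n : Int) + 1) n acc]
      have hb : decide (PySem.Int.truncdiv m ((n : Int) + 1) = 0 ∨ n = 0) = true := by
        simpa using hflag
      simp only [hb]
      rw [ih (t - 1) (by omega) (by omega)]
      rw [show t.toNat = (t - 1).toNat + 1 by omega]
      rw [List.replicate_succ, List.flatten_cons, List.append_assoc]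

-- non-clustering case: exactly one block
theorem pvOuter_once (c m : Int) (n : Nat) (hc : c = (n : Int) + 1)
    (hflag : ¬ (PySem.Int.truncdiv m c = 0 ∨ n = 0)) (t : Int) (h1 : 1 ≤ t) (acc : List (Int × Int)) :
    pvOuter c m true t acc =
      acc ++ (PySem.List.pyRange 0 c 1).map (fun col => ((PySem.Int.truncdiv m c) * col, m)) := by
  subst hc
  rw [pvOuter, dif_pos (show (true = true ∧ 1 ≤ t) from ⟨rfl, h1⟩)]
  rw [pvInner_char m ((n : Int) + 1) n acc]
  have hb : decide (PySem.Int.truncdiv m ((n : Int) + 1) = 0 ∨ n = 0) = false := by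
    simpa using hflag
  simp only [hb]
  rw [pvOuter, dif_neg (by simp)]

-- ===== VERDICT (by name: the statement is the Claim_ definition above) =====
theorem generate_markeveries_spec : Claim_equal_generate_markeveries := by
  intro r c t _ hpre
  unfold Spec_generate_markeveries generate_markeveries generate_markeveries_alt
  simp only [pvBlockStep_eq]
  set m := PySem.Int.truncdiv r t with hm
  by_cases ht : t < 1
  · rw [pvOuter]
    have : ¬ (1 ≤ t) := by omega
    simp [this, ht]
  · have ht1 : 1 ≤ t := by omega
    rw [if_neg ht]
    by_cases hcz : c < 1
    · rw [pvOuter_empty c m (by omega) t.toNat t rfl []]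
      rw [PySem.List.pyRange_one_eq_nil (by omega)]
      simp
    · have hc1 : 1 ≤ c := by omega
      have hc : c = ((c.toNat - 1 : Nat) : Int) + 1 := by omega
      set n := c.toNat - 1 with hn
      rw [hc, pvInner_char m ((n : Int) + 1) n []]
      by_cases hflag : PySem.Int.truncdiv m ((n : Int) + 1) = 0 ∨ n = 0
      · rw [pvOuter_rep ((n : Int) + 1) m n rfl hflag t.toNat t rfl (by omega) []]
        have hb : decide (PySem.Int.truncdiv m ((n : Int) + 1) = 0 ∨ n = 0) = true := by
          simpa using hflag
        simp [hb]
      · rw [pvOuter_once ((n : Int) + 1) m n rfl hflag t ht1 []]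
        have hb : decide (PySem.Int.truncdiv m ((n : Int) + 1) = 0 ∨ n = 0) = false := by
          simpa using hflag
        simp [hb]
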